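-- pv_equiv track=rewrite | github.com/adanzl/leetcode-practice | py/q1900/Q1945.py | getLucky
-- ===== SOURCE A (Python) =====
-- def getLucky(s: str, k: int) -> int:
--     sm = 0
--     for num in [ord(c) - ord('a') + 1 for c in s]:
--         while num:
--             sm += num % 10
--             num //= 10
--     for _ in range(1, k):
--         nn = 0
--         while sm:
--             nn += sm % 10
--             sm //= 10
--         sm = nn
--     return sm
-- ===== SOURCE B (Python) =====
-- def _dsum(n):
--     return n if n < 10 else n % 10 + _dsum(n // 10)
--
--
-- def getLucky(s: str, k: int) -> int:
--     # First pass: one flat loop with the closed-form digit sum of the (<=2-digit)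
--     # letter position v, namely v - 9*(v//10) -- no inner digit-extraction loop.
--     sm = 0
--     for c in s:
--         v = ord(c) - 96
--         sm += v - 9 * (v // 10)
--     # Remaining passes: early-exit as soon as sm is a single digit (a fixpoint of
--     # the digit sum), instead of running all k-1 iterations.
--     steps = k - 1
--     while steps > 0 and sm >= 10:
--         sm = _dsum(sm)
--         steps -= 1
--     return sm
-- ===== Notes on version B (the rewrite author's own statement) =====
-- stated objective: faster
-- what changed: B replaces A's nested per-character digit-extraction loop by one flat pass using the closed-form digit sum v-9*(v//10) of the at-most-two-digit letter position, and replaces A's fixed k-1 iterations by an early-exit loop that stops once the sum is a single digit (a fixpoint of the digit sum), with a recursive digit sum for the few remaining steps.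
import Mathlib
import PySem

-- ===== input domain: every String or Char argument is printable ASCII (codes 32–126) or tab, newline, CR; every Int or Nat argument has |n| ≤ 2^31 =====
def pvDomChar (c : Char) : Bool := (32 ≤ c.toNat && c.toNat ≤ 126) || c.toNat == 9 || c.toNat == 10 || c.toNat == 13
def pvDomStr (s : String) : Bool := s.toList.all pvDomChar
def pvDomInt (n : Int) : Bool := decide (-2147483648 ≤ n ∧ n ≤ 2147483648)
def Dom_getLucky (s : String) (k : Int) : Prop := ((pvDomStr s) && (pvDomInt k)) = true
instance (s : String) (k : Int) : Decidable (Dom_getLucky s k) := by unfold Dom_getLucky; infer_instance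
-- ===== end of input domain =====

-- B removes A's inner digit-extraction loops (closed-form per-letter digit sum) and
-- exits the k-1 iterations early at a single-digit fixpoint (objective: faster in k).

-- ===== PORT A =====
-- 'while num: sm += num % 10; num //= 10'.  Guard '0 < num' (instead of Python's 'num != 0')
-- only makes the recursion total: for num < 0 the Python loop never terminates (outside Pre_).
def pvWhileDigits (num sm : Int) : Int :=
  if _h : 0 < num then pvWhileDigits (PySem.Int.floordiv num 10) (sm + PySem.Int.mod num 10)
  else sm
termination_by num.toNat
decreasing_by
  rw [PySem.Int.floordiv_eq_ediv_of_pos (by norm_num)]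
  omega

def getLucky (s : String) (k : Int) : Int :=
  let sm := s.toList.foldl (fun sm c => pvWhileDigits ((c.toNat : Int) - 97 + 1) sm) 0
  (PySem.List.pyRange 1 k 1).foldl (fun sm _ => pvWhileDigits sm 0) sm

-- ===== PORT B =====
-- _dsum: 'n if n < 10 else n % 10 + _dsum(n // 10)'.  Total, faithful on all ints it is
-- called on here (the guard n < 10 already returns for the negatives).
def pvDsum (n : Int) : Int :=
  if _h : n < 10 then n else PySem.Int.mod n 10 + pvDsum (PySem.Int.floordiv n 10)
termination_by n.toNat
decreasing_by
  rw [PySem.Int.floordiv_eq_ediv_of_pos (by norm_num)]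
  omega

-- 'while steps > 0 and sm >= 10: sm = _dsum(sm); steps -= 1'
def pvWhileB (steps sm : Int) : Int :=
  if _h : 0 < steps ∧ 10 ≤ sm then pvWhileB (steps - 1) (pvDsum sm) else sm
termination_by steps.toNat
decreasing_by omega

def getLucky_alt (s : String) (k : Int) : Int :=
  let sm := s.toList.foldl (fun sm c =>
    let v : Int := (c.toNat : Int) - 96
    sm + (v - 9 * PySem.Int.floordiv v 10)) 0
  pvWhileB (k - 1) sm

-- ===== PRECONDITION & SPEC =====
-- Pre_ excludes strings containing a character with code < 96 ('`' is 96): on such characters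
-- ord(c)-96 is negative and A's 'while num' loop never terminates (num //= 10 stalls at -1),
-- so A returns on no excluded input.
def Pre_getLucky (s : String) (k : Int) : Prop := s.toList.all (fun c => 96 ≤ c.toNat) = true
instance (s : String) (k : Int) : Decidable (Pre_getLucky s k) := by unfold Pre_getLucky; infer_instance

def pvWitness_getLucky : String × Int := ("zip", 4)

def Spec_getLucky (s : String) (k : Int) (out : Int) : Prop := out = getLucky_alt s k
instance (s : String) (k : Int) (out : Int) : Decidable (Spec_getLucky s k out) := by unfold Spec_getLucky; infer_instance

-- ===== CLAIM (what is proved, stated in full; the proofs are below) =====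
def Claim_equal_getLucky : Prop := ∀ (s : String) (k : Int), Dom_getLucky s k → Pre_getLucky s k → Spec_getLucky s k (getLucky s k)

-- ===== LEMMAS AND PROOFS =====

-- mathematical digit sum of a natural number
def pvDigitSumNat (n : Nat) : Nat :=
  if h : n = 0 then 0 else n % 10 + pvDigitSumNat (n / 10)
decreasing_by exact Nat.div_lt_self (Nat.pos_of_ne_zero h) (by norm_num)

theorem pvWhileDigits_eq_digitSum (m : Nat) :
    ∀ sm : Int, pvWhileDigits (m : Int) sm = sm + (pvDigitSumNat m : Int) := by
  induction m using Nat.strong_induction_on with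
  | _ m ih =>
    intro sm
    rw [pvWhileDigits, pvDigitSumNat]
    by_cases hm : m = 0
    · simp [hm]
    · have hpos : 0 < (m : Int) := by exact_mod_cast Nat.pos_of_ne_zero hm
      rw [dif_pos hpos]
      have hf : PySem.Int.floordiv (m : Int) 10 = ((m / 10 : Nat) : Int) := by
        exact_mod_cast PySem.Int.floordiv_natCast m 10
      have hm10 : PySem.Int.mod (m : Int) 10 = ((m % 10 : Nat) : Int) := by
        exact_mod_cast PySem.Int.mod_natCast m 10
      rw [hf, hm10, ih (m / 10) (Nat.div_lt_self (Nat.pos_of_ne_zero hm) (by norm_num))]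
      simp [hm]
      ring

theorem pvDigitSumNat_small (m : Nat) (h : m < 10) : pvDigitSumNat m = m := by
  rw [pvDigitSumNat]
  by_cases hm : m = 0
  · simp [hm]
  · rw [dif_neg hm]
    have h10 : m / 10 = 0 := Nat.div_eq_of_lt h
    rw [h10, pvDigitSumNat]
    simp
    omega

theorem pvDigitSumNat_two_digit (m : Nat) (h : m < 100) :
    (pvDigitSumNat m : Int) = (m : Int) - 9 * ((m : Nat) / 10 : Nat) := by
  rw [pvDigitSumNat]
  by_cases hm : m = 0
  · simp [hm]
  · rw [dif_neg hm, pvDigitSumNat_small (m / 10) (by omega)]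
    have := Nat.div_add_mod m 10
    push_cast
    omega

theorem pvDsum_eq_digitSum (m : Nat) : pvDsum (m : Int) = (pvDigitSumNat m : Int) := by
  induction m using Nat.strong_induction_on with
  | _ m ih =>
    rw [pvDsum]
    by_cases h : (m : Int) < 10
    · rw [dif_pos h, pvDigitSumNat_small m (by exact_mod_cast h)]
    · rw [dif_neg h]
      have hm : m ≠ 0 := by intro e; simp [e] at h
      have hf : PySem.Int.floordiv (m : Int) 10 = ((m / 10 : Nat) : Int) := by
        exact_mod_cast PySem.Int.floordiv_natCast m 10
      have hm10 : PySem.Int.mod (m : Int) 10 = ((m % 10 : Nat) : Int) := by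
        exact_mod_cast PySem.Int.mod_natCast m 10
      rw [hf, hm10, ih (m / 10) (Nat.div_lt_self (Nat.pos_of_ne_zero hm) (by norm_num))]
      conv_rhs => rw [pvDigitSumNat, dif_neg hm]
      push_cast
      ring

-- the step function both iterations compute
def pvG (x : Int) : Int := pvWhileDigits x 0

theorem pvG_nat (m : Nat) : pvG (m : Int) = (pvDigitSumNat m : Int) := by
  rw [pvG, pvWhileDigits_eq_digitSum, zero_add]

theorem foldl_ignore_iterate {α : Type} (g : α → α) (l : List Int) (i : α) :
    l.foldl (fun a _ => g a) i = g^[l.length] i := by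
  induction l generalizing i with
  | nil => rfl
  | cons x xs ih => simp [List.foldl_cons, ih, Function.iterate_succ_apply]

theorem pvWhileB_eq_iterate : ∀ (n : Nat) (steps : Int), steps.toNat = n →
    ∀ m : Nat, pvWhileB steps (m : Int) = pvG^[n] (m : Int) := by
  intro n
  induction n with
  | zero =>
    intro steps hs m
    rw [pvWhileB, dif_neg (by omega), Function.iterate_zero_apply]
  | succ n ih =>
    intro steps hs m
    by_cases h10 : 10 ≤ (m : Int)
    · rw [pvWhileB, dif_pos ⟨by omega, h10⟩, pvDsum_eq_digitSum,
        ih (steps - 1) (by omega) (pvDigitSumNat m), Function.iterate_succ_apply, pvG_nat]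
    · have hm : m < 10 := by exact_mod_cast not_le.mp h10
      rw [pvWhileB, dif_neg (by omega)]
      have hfix : pvG (m : Int) = (m : Int) := by
        rw [pvG_nat, pvDigitSumNat_small m hm]
      exact (Function.iterate_fixed hfix (n + 1)).symm

-- the A-side first pass equals the B-side first pass, both as a sum of per-letter digit sums
theorem foldA_eq (l : List Char) (hc : ∀ c ∈ l, 96 ≤ c.toNat) :
    ∀ sm : Int, l.foldl (fun sm c => pvWhileDigits ((c.toNat : Int) - 97 + 1) sm) sm
      = sm + (l.map (fun c => (pvDigitSumNat (c.toNat - 96) : Int))).sum := by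
  induction l with
  | nil => simp
  | cons x xs ih =>
    intro sm
    have hx : 96 ≤ x.toNat := hc x (by simp)
    have hcast : (x.toNat : Int) - 97 + 1 = ((x.toNat - 96 : Nat) : Int) := by omega
    simp only [List.foldl_cons, List.map_cons, List.sum_cons, hcast,
      pvWhileDigits_eq_digitSum, ih (fun c h => hc c (by simp [h]))]
    ring

theorem foldB_eq (l : List Char) (hc : ∀ c ∈ l, 96 ≤ c.toNat ∧ c.toNat ≤ 126) :
    ∀ sm : Int, l.foldl (fun sm c =>
        let v : Int := (c.toNat : Int) - 96
        sm + (v - 9 * PySem.Int.floordiv v 10)) sm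
      = sm + (l.map (fun c => (pvDigitSumNat (c.toNat - 96) : Int))).sum := by
  induction l with
  | nil => simp
  | cons x xs ih =>
    intro sm
    obtain ⟨hx, hx2⟩ := hc x (by simp)
    have hcast : (x.toNat : Int) - 96 = ((x.toNat - 96 : Nat) : Int) := by omega
    have hf : PySem.Int.floordiv (((x.toNat - 96 : Nat) : Int)) 10
        = (((x.toNat - 96) / 10 : Nat) : Int) := by
      exact_mod_cast PySem.Int.floordiv_natCast (x.toNat - 96) 10
    simp only [List.foldl_cons, List.map_cons, List.sum_cons,
      ih (fun c h => hc c (by simp [h]))]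
    rw [hcast, hf, pvDigitSumNat_two_digit (x.toNat - 96) (by omega)]
    ring

theorem pvDigitSum_list_nonneg (l : List Char) :
    ∃ m : Nat, (l.map (fun c => (pvDigitSumNat (c.toNat - 96) : Int))).sum = (m : Int) := by
  induction l with
  | nil => exact ⟨0, rfl⟩
  | cons x xs ih =>
    obtain ⟨m, hm⟩ := ih
    exact ⟨pvDigitSumNat (x.toNat - 96) + m, by simp [hm]⟩

-- ===== VERDICT (by name: the statement is the Claim_ definition above) =====
theorem getLucky_spec : Claim_equal_getLucky := by
  intro s k hdom hpre
  unfold Spec_getLucky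
  show getLucky s k = getLucky_alt s k
  simp only [getLucky, getLucky_alt]
  have hc : ∀ c ∈ s.toList, 96 ≤ c.toNat := by
    intro c hcm
    exact of_decide_eq_true (List.all_eq_true.mp hpre c hcm)
  have hc2 : ∀ c ∈ s.toList, 96 ≤ c.toNat ∧ c.toNat ≤ 126 := by
    intro c hcm
    refine ⟨hc c hcm, ?_⟩
    have hdom' : pvDomStr s = true := by
      unfold Dom_getLucky at hdom
      simp only [Bool.and_eq_true] at hdom
      exact hdom.1
    have := List.all_eq_true.mp hdom' c hcm
    unfold pvDomChar at this
    have h96 := hc c hcm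
    simp only [Bool.or_eq_true, Bool.and_eq_true, decide_eq_true_eq, beq_iff_eq] at this
    omega
  rw [foldA_eq s.toList hc 0, foldB_eq s.toList hc2 0, zero_add]
  obtain ⟨m, hm⟩ := pvDigitSum_list_nonneg s.toList
  rw [hm, foldl_ignore_iterate, PySem.List.length_pyRange_one,
    pvWhileB_eq_iterate (k - 1).toNat (k - 1) rfl m]
  rfl
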